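-- pv_equiv track=rewrite | github.com/nocode4me/cloud-pipeline | workflows/pipe-common/scripts/cluster_wait_for_node.py | check_run
-- ===== SOURCE A (Python) =====
-- def check_run(run, params):
--     run_params = {}
--     for run_param in run['pipelineRunParameters']:
--         value = run_param['value'] if 'value' in run_param else None
--         run_params[run_param['name']] = value
--     for param in params:
--         if param[0] not in run_params or run_params[param[0]] != param[1]:
--             return False
--     return True
-- ===== SOURCE B (Python) =====
-- def check_run(run, params):
--     # Reduce required params to a conflict-checked name->value table, then make a
--     # SINGLE reverse pass over the run parameters: the first occurrence seen in
--     # reverse is the authoritative (last) one; tick names off a pending set.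
--     required = {}
--     for name, value in params:
--         if name in required and required[name] != value:
--             return False
--         required[name] = value
--     pending = set(required)
--     for run_param in reversed(run['pipelineRunParameters']):
--         name = run_param['name']
--         if name in pending:
--             if run_param.get('value') != required[name]:
--                 return False
--             pending.discard(name)
--     return not pending
-- ===== Notes on version B (the rewrite author's own statement) =====
-- stated objective: alternative
-- what changed: B inverts the traversal: it first folds the required params into a conflict-checked name->value table, then makes a single reverse pass over the run parameters, ticking names off a pending set at their first occurrence in reverse (= authoritative last occurrence) and failing fast on a value mismatch, instead of A's build-a-run-dict-then-check-each-param.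
import Mathlib
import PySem

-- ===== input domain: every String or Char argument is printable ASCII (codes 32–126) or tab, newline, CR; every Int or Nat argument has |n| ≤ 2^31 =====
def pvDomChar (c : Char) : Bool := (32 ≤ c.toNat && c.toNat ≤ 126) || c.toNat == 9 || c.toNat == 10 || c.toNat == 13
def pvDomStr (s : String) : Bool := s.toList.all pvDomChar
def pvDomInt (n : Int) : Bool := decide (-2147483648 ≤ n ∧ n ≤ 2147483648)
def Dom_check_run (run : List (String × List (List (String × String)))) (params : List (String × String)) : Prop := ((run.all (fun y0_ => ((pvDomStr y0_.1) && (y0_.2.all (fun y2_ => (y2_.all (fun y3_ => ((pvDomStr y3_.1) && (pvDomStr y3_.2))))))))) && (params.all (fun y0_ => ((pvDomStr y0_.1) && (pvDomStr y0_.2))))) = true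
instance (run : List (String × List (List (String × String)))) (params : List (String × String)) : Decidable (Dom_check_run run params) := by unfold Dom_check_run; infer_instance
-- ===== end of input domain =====

-- B inverts the traversal: a conflict-checked required table plus ONE reverse pass over the
-- run parameters with a pending set, instead of A's run-dict build followed by per-param
-- lookups. Return values only, no mutation involved.

-- ===== PORT A =====
-- run_params[run_param['name']] = value  (entries without 'name' make Python raise; excluded by Pre_)
def buildRunParams (rps : List (List (String × String))) : PySem.Dict String (Option String) :=
  rps.foldl (fun d rp =>
    let value : Option String := (PySem.Dict.mk rp).get? "value"
    match (PySem.Dict.mk rp).get? "name" with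
    | none => d
    | some name => d.insert name value) PySem.Dict.empty

-- the second loop of A, with its early returns
def checkLoopA (run_params : PySem.Dict String (Option String)) : List (String × String) → Bool
  | [] => true
  | (n, v) :: rest =>
    match run_params.get? n with
    | none => false
    | some rv => if rv ≠ some v then false else checkLoopA run_params rest

def check_run (run : List (String × List (List (String × String)))) (params : List (String × String)) : Bool :=
  match (PySem.Dict.mk run).get? "pipelineRunParameters" with
  | none => false   -- Python raises KeyError here; excluded by Pre_
  | some rps => checkLoopA (buildRunParams rps) params

-- ===== PORT B =====
-- B's first loop: fold params into a table, failing on a conflicting duplicate name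
def buildRequired (d : PySem.Dict String String) : List (String × String) → Option (PySem.Dict String String)
  | [] => some d
  | (n, v) :: rest =>
    match d.get? n with
    | some v' => if v' ≠ v then none else buildRequired (d.insert n v) rest
    | none => buildRequired (d.insert n v) rest

-- B's second loop: one pass over the REVERSED run parameters with a pending set
def scanRev (required : PySem.Dict String String) : List (List (String × String)) → PySem.Set String → Bool
  | [], pending => pending.isEmpty
  | rp :: rest, pending =>
    match (PySem.Dict.mk rp).get? "name" with
    | none => scanRev required rest pending   -- Python raises KeyError here; excluded by Pre_
    | some n =>
      if n ∈ pending then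
        match required.get? n with
        | none => scanRev required rest pending   -- unreachable: pending ⊆ required's keys
        | some v =>
          if (PySem.Dict.mk rp).get? "value" ≠ some v then false
          else scanRev required rest (PySem.Set.discard pending n)
      else scanRev required rest pending

def check_run_alt (run : List (String × List (List (String × String)))) (params : List (String × String)) : Bool :=
  match buildRequired PySem.Dict.empty params with
  | none => false
  | some required =>
    match (PySem.Dict.mk run).get? "pipelineRunParameters" with
    | none => false   -- Python raises KeyError here; excluded by Pre_
    | some rps => scanRev required rps.reverse (PySem.Set.ofList required.keys)

-- ===== PRECONDITION & SPEC =====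
-- Pre_ excludes exactly the inputs where the Python A raises KeyError: a missing
-- 'pipelineRunParameters' key, or a run parameter dict without a 'name' key.
def Pre_check_run (run : List (String × List (List (String × String)))) (params : List (String × String)) : Prop :=
  ((PySem.Dict.mk run).get? "pipelineRunParameters").isSome ∧
  ∀ rp ∈ ((PySem.Dict.mk run).get? "pipelineRunParameters").getD [], ((PySem.Dict.mk rp).get? "name").isSome
instance (run : List (String × List (List (String × String)))) (params : List (String × String)) : Decidable (Pre_check_run run params) := by unfold Pre_check_run; infer_instance
def pvWitness_check_run : (List (String × List (List (String × String)))) × (List (String × String)) :=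
  ([("pipelineRunParameters", [[("name", "a"), ("value", "1")]])], [("a", "1")])

def Spec_check_run (run : List (String × List (List (String × String)))) (params : List (String × String)) (out : Bool) : Prop := out = check_run_alt run params
instance (run : List (String × List (List (String × String)))) (params : List (String × String)) (out : Bool) : Decidable (Spec_check_run run params out) := by unfold Spec_check_run; infer_instance

-- ===== CLAIM (what is proved, stated in full; the proofs are below) =====
def Claim_equal_check_run : Prop := ∀ (run : List (String × List (List (String × String)))) (params : List (String × String)), Dom_check_run run params → Pre_check_run run params → Spec_check_run run params (check_run run params)

-- ===== LEMMAS AND PROOFS =====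

-- value of the LAST entry whose 'name' is n (as A's dict-overwrite build produces it)
def lastMatch (rps : List (List (String × String))) (n : String) : Option (Option String) :=
  rps.foldl (fun acc rp =>
    if (PySem.Dict.mk rp).get? "name" = some n then some ((PySem.Dict.mk rp).get? "value") else acc) none

-- value of the FIRST entry whose 'name' is n (what B's reverse pass meets first)
def firstMatch : List (List (String × String)) → String → Option (Option String)
  | [], _ => none
  | rp :: rest, n =>
    if (PySem.Dict.mk rp).get? "name" = some n then some ((PySem.Dict.mk rp).get? "value")
    else firstMatch rest n


-- the value A's dict lookup returns is the last-match value
theorem get?_buildRunParams_fold (rps : List (List (String × String)))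
    (d : PySem.Dict String (Option String)) (n : String) :
    (rps.foldl (fun d rp =>
      match (PySem.Dict.mk rp).get? "name" with
      | none => d
      | some name => d.insert name ((PySem.Dict.mk rp).get? "value")) d).get? n =
    rps.foldl (fun acc rp =>
      if (PySem.Dict.mk rp).get? "name" = some n then some ((PySem.Dict.mk rp).get? "value") else acc) (d.get? n) := by
  induction rps generalizing d with
  | nil => rfl
  | cons rp rest ih =>
    simp only [List.foldl_cons]
    rw [ih]
    congr 1
    cases h : (PySem.Dict.mk rp).get? "name" with
    | none => simp
    | some k =>
      rw [PySem.Dict.get?_insert]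
      by_cases hk : n = k
      · subst hk; simp
      · rw [if_neg (show ¬(some k = some n) by simp; exact fun h' => hk h'.symm), if_neg hk]

theorem get?_buildRunParams (rps : List (List (String × String))) (n : String) :
    (buildRunParams rps).get? n = lastMatch rps n := by
  unfold buildRunParams lastMatch
  rw [get?_buildRunParams_fold]
  simp [PySem.Dict.get?_empty]

-- A's second loop is the conjunction of per-param last-match checks
theorem checkLoopA_iff (d : PySem.Dict String (Option String)) (params : List (String × String)) :
    checkLoopA d params = true ↔ ∀ p ∈ params, d.get? p.1 = some (some p.2) := by
  induction params with
  | nil => simp [checkLoopA]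
  | cons p rest ih =>
    obtain ⟨n, v⟩ := p
    cases h : d.get? n with
    | none =>
      refine iff_of_false (by simp [checkLoopA, h]) ?_
      intro hall
      have := hall (n, v) (List.mem_cons_self ..)
      simp only at this
      rw [h] at this
      cases this
    | some rv =>
      by_cases hrv : rv = some v
      · subst hrv
        have hred : checkLoopA d ((n, v) :: rest) = checkLoopA d rest := by
          simp [checkLoopA, h]
        rw [hred, ih]
        constructor
        · rintro hall q hq
          rcases List.mem_cons.mp hq with rfl | hq'
          · exact h
          · exact hall q hq'
        · intro hall q hq
          exact hall q (List.mem_cons_of_mem _ hq)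
      · refine iff_of_false (by simp [checkLoopA, h, hrv]) ?_
        intro hall
        have := hall (n, v) (List.mem_cons_self ..)
        simp only at this
        rw [h] at this
        exact hrv (by injection this)

-- firstMatch over an append
theorem firstMatch_append (l1 l2 : List (List (String × String))) (n : String) :
    firstMatch (l1 ++ l2) n =
      match firstMatch l1 n with
      | some ov => some ov
      | none => firstMatch l2 n := by
  induction l1 with
  | nil => simp [firstMatch]
  | cons rp rest ih =>
    simp only [List.cons_append, firstMatch]
    split_ifs with h
    · rfl
    · exact ih

-- the last match of a list is the first match of its reverse
theorem lastMatch_fold (rps : List (List (String × String))) (n : String)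
    (acc : Option (Option String)) :
    rps.foldl (fun acc rp =>
      if (PySem.Dict.mk rp).get? "name" = some n then some ((PySem.Dict.mk rp).get? "value") else acc) acc =
    match firstMatch rps.reverse n with
    | some ov => some ov
    | none => acc := by
  induction rps generalizing acc with
  | nil => simp [firstMatch]
  | cons rp rest ih =>
    simp only [List.foldl_cons, List.reverse_cons]
    rw [ih, firstMatch_append]
    cases firstMatch rest.reverse n with
    | some ov => rfl
    | none =>
      by_cases hc : (PySem.Dict.mk rp).get? "name" = some n <;> simp [firstMatch, hc]

theorem lastMatch_eq_firstMatch_reverse (rps : List (List (String × String))) (n : String) :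
    lastMatch rps n = firstMatch rps.reverse n := by
  unfold lastMatch
  rw [lastMatch_fold]
  cases firstMatch rps.reverse n <;> rfl

-- B's reverse scan is the conjunction of per-pending-name first-match checks
theorem scanRev_iff (required : PySem.Dict String String)
    (l : List (List (String × String))) (pending : PySem.Set String)
    (hnames : ∀ rp ∈ l, ((PySem.Dict.mk rp).get? "name").isSome)
    (hkeys : ∀ n ∈ pending, (required.get? n).isSome) :
    scanRev required l pending = true ↔
      ∀ n ∈ pending, ∃ v, required.get? n = some v ∧ firstMatch l n = some (some v) := by
  induction l generalizing pending with
  | nil =>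
    simp only [scanRev, List.isEmpty_iff]
    constructor
    · rintro rfl; simp
    · intro h
      cases pending with
      | nil => rfl
      | cons m rest =>
        obtain ⟨v, _, hfm⟩ := h m (by simp)
        simp [firstMatch] at hfm
  | cons rp rest ih =>
    have hname : ((PySem.Dict.mk rp).get? "name").isSome := hnames rp (by simp)
    obtain ⟨m, hm⟩ : ∃ m, (PySem.Dict.mk rp).get? "name" = some m :=
      Option.isSome_iff_exists.mp hname
    have hnames' : ∀ q ∈ rest, ((PySem.Dict.mk q).get? "name").isSome :=
      fun q hq => hnames q (by simp [hq])
    simp only [scanRev, hm]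
    by_cases hmp : m ∈ pending
    · rw [if_pos hmp]
      obtain ⟨vm, hvm⟩ : ∃ vm, required.get? m = some vm :=
        Option.isSome_iff_exists.mp (hkeys m hmp)
      rw [hvm]
      show (if (PySem.Dict.mk rp).get? "value" ≠ some vm then false
            else scanRev required rest (PySem.Set.discard pending m)) = true ↔ _
      by_cases hval : (PySem.Dict.mk rp).get? "value" = some vm
      · rw [if_neg (by simpa using hval)]
        rw [ih (PySem.Set.discard pending m)
          hnames' (fun n hn => hkeys n ((PySem.Set.mem_discard _ _ _).mp hn).1)]
        constructor
        · intro hall n hn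
          by_cases hnm : n = m
          · subst hnm
            exact ⟨vm, hvm, by simp [firstMatch, hm, hval]⟩
          · obtain ⟨v, hv, hfm⟩ := hall n ((PySem.Set.mem_discard _ _ _).mpr ⟨hn, hnm⟩)
            refine ⟨v, hv, ?_⟩
            simpa [firstMatch, hm, Ne.symm hnm] using hfm
        · intro hall n hn
          obtain ⟨hnp, hnm⟩ := (PySem.Set.mem_discard _ _ _).mp hn
          obtain ⟨v, hv, hfm⟩ := hall n hnp
          refine ⟨v, hv, ?_⟩
          simp only [firstMatch, hm] at hfm
          rw [if_neg (by simpa using Ne.symm hnm)] at hfm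
          exact hfm
      · rw [if_pos (by simpa using hval)]
        refine iff_of_false (by simp) ?_
        intro hall
        obtain ⟨v, hv, hfm⟩ := hall m hmp
        rw [hvm] at hv
        obtain rfl : vm = v := by injection hv
        simp [firstMatch, hm] at hfm
        exact hval hfm
    · rw [if_neg hmp]
      rw [ih pending hnames' hkeys]
      apply forall₂_congr
      intro n hn
      have hnm : n ≠ m := fun h => hmp (h ▸ hn)
      constructor
      · rintro ⟨v, hv, hfm⟩
        exact ⟨v, hv, by simpa [firstMatch, hm, Ne.symm hnm] using hfm⟩
      · rintro ⟨v, hv, hfm⟩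
        refine ⟨v, hv, ?_⟩
        simp only [firstMatch, hm] at hfm
        rwa [if_neg (by simpa using Ne.symm hnm)] at hfm

-- buildRequired preserves key uniqueness
theorem buildRequired_nodup (params : List (String × String)) (d req : PySem.Dict String String)
    (hd : d.keys.Nodup) (h : buildRequired d params = some req) : req.keys.Nodup := by
  induction params generalizing d with
  | nil => cases h; exact hd
  | cons p rest ih =>
    obtain ⟨n, v⟩ := p
    cases hg : d.get? n with
    | none =>
      have hred : buildRequired d ((n, v) :: rest) = buildRequired (d.insert n v) rest := by
        simp [buildRequired, hg]
      rw [hred] at h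
      exact ih (d.insert n v) (PySem.Dict.nodup_keys_insert _ _ _ hd) h
    | some v' =>
      by_cases hv : v' = v
      · subst hv
        have hred : buildRequired d ((n, v') :: rest) = buildRequired (d.insert n v') rest := by
          simp [buildRequired, hg]
        rw [hred] at h
        exact ih (d.insert n v') (PySem.Dict.nodup_keys_insert _ _ _ hd) h
      · have hred : buildRequired d ((n, v) :: rest) = none := by
          simp [buildRequired, hg, hv]
        rw [hred] at h
        cases h

-- the combined buildRequired+per-key check equals the per-param check, any seed d
theorem buildRequired_iff (rps : List (List (String × String)))
    (params : List (String × String)) (d : PySem.Dict String String) :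
    (match buildRequired d params with
     | none => False
     | some req => ∀ n ∈ req.keys, ∃ v, req.get? n = some v ∧ lastMatch rps n = some (some v))
    ↔ (∀ n v, d.get? n = some v → lastMatch rps n = some (some v)) ∧
      (∀ p ∈ params, lastMatch rps p.1 = some (some p.2)) := by
  induction params generalizing d with
  | nil =>
    show (∀ n ∈ d.keys, ∃ v, d.get? n = some v ∧ lastMatch rps n = some (some v)) ↔ _
    constructor
    · intro hall
      refine ⟨?_, by simp⟩
      intro n v hget
      have hmem : n ∈ d.keys := by
        by_contra hn
        rw [(PySem.Dict.get?_eq_none_iff_not_mem_keys d n).mpr hn] at hget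
        cases hget
      obtain ⟨v', hv', hlm⟩ := hall n hmem
      rw [hget] at hv'
      obtain rfl : v = v' := by injection hv'
      exact hlm
    · rintro ⟨hall, -⟩
      intro n hn
      cases hget : d.get? n with
      | none => exact absurd hn ((PySem.Dict.get?_eq_none_iff_not_mem_keys d n).mp hget)
      | some v => exact ⟨v, rfl, hall n v hget⟩
  | cons p rest ih =>
    obtain ⟨n, v⟩ := p
    cases hg : d.get? n with
    | none =>
      have hred : buildRequired d ((n, v) :: rest) = buildRequired (d.insert n v) rest := by
        simp [buildRequired, hg]
      rw [hred, ih (d.insert n v)]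
      constructor
      · rintro ⟨hold, hrest⟩
        refine ⟨?_, ?_⟩
        · intro n' v' hget
          by_cases hn' : n' = n
          · subst hn'; rw [hg] at hget; cases hget
          · exact hold n' v' (by rw [PySem.Dict.get?_insert, if_neg hn']; exact hget)
        · intro q hq
          rcases List.mem_cons.mp hq with rfl | hq'
          · exact hold n v (by rw [PySem.Dict.get?_insert, if_pos rfl])
          · exact hrest q hq'
      · rintro ⟨hold, hparams⟩
        refine ⟨?_, fun q hq => hparams q (List.mem_cons_of_mem _ hq)⟩
        intro n' v' hget
        rw [PySem.Dict.get?_insert] at hget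
        by_cases hn' : n' = n
        · rw [if_pos hn'] at hget
          obtain rfl : v = v' := by injection hget
          subst hn'
          exact hparams (n', v) (List.mem_cons_self ..)
        · rw [if_neg hn'] at hget
          exact hold n' v' hget
    | some v' =>
      by_cases hv : v' = v
      · subst hv
        have hred : buildRequired d ((n, v') :: rest) = buildRequired (d.insert n v') rest := by
          simp [buildRequired, hg]
        rw [hred, ih (d.insert n v')]
        constructor
        · rintro ⟨hold, hrest⟩
          refine ⟨?_, ?_⟩
          · intro n' w hget
            by_cases hn' : n' = n
            · have h1 : lastMatch rps n = some (some v') :=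
                hold n v' (by rw [PySem.Dict.get?_insert, if_pos rfl])
              have h2 : (some v' : Option String) = some w := by
                rw [hn', hg] at hget; exact hget
              injection h2 with h2
              rw [hn', ← h2]
              exact h1
            · exact hold n' w (by rw [PySem.Dict.get?_insert, if_neg hn']; exact hget)
          · intro q hq
            rcases List.mem_cons.mp hq with rfl | hq'
            · exact hold n v' (by rw [PySem.Dict.get?_insert, if_pos rfl])
            · exact hrest q hq'
        · rintro ⟨hold, hparams⟩
          refine ⟨?_, fun q hq => hparams q (List.mem_cons_of_mem _ hq)⟩
          intro n' w hget
          rw [PySem.Dict.get?_insert] at hget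
          by_cases hn' : n' = n
          · rw [if_pos hn'] at hget
            obtain rfl : v' = w := by injection hget
            subst hn'
            exact hparams (n', v') (List.mem_cons_self ..)
          · rw [if_neg hn'] at hget
            exact hold n' w hget
      · have hred : buildRequired d ((n, v) :: rest) = none := by
          simp [buildRequired, hg, hv]
        rw [hred]
        refine iff_of_false id ?_
        rintro ⟨hold, hparams⟩
        have h1 := hold n v' hg
        have h2 := hparams (n, v) (List.mem_cons_self ..)
        simp only at h2
        rw [h1] at h2
        obtain h3 : v' = v := by injection h2 with h2'; injection h2'
        exact hv h3

-- ===== VERDICT (by name: the statement is the Claim_ definition above) =====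
theorem check_run_spec : Claim_equal_check_run := by
  intro run params _ hpre
  unfold Spec_check_run check_run check_run_alt
  obtain ⟨hkey, hnames⟩ := hpre
  obtain ⟨rps, hrps⟩ : ∃ rps, (PySem.Dict.mk run).get? "pipelineRunParameters" = some rps :=
    Option.isSome_iff_exists.mp hkey
  rw [hrps]
  rw [hrps] at hnames
  simp only [Option.getD_some] at hnames
  have hnamesR : ∀ rp ∈ rps.reverse, ((PySem.Dict.mk rp).get? "name").isSome :=
    fun rp hrp => hnames rp (List.mem_reverse.mp hrp)
  -- A's truth condition
  have hA : checkLoopA (buildRunParams rps) params = true ↔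
      ∀ p ∈ params, lastMatch rps p.1 = some (some p.2) := by
    rw [checkLoopA_iff]
    apply forall₂_congr
    intro p _
    rw [get?_buildRunParams]
  -- B's truth condition
  have hEmpty : ∀ n v, (PySem.Dict.empty : PySem.Dict String String).get? n = some v →
      lastMatch rps n = some (some v) := by
    intro n v h
    rw [PySem.Dict.get?_empty] at h
    cases h
  cases hbr : buildRequired PySem.Dict.empty params with
  | none =>
    -- both sides false
    have := buildRequired_iff rps params PySem.Dict.empty
    rw [hbr] at this
    simp only [false_iff, not_and] at this
    have hnp := this hEmpty
    show checkLoopA (buildRunParams rps) params = false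
    cases hca : checkLoopA (buildRunParams rps) params
    · rfl
    · exact absurd (hA.mp hca) hnp
  | some req =>
    have hnodup : req.keys.Nodup :=
      buildRequired_nodup params PySem.Dict.empty req PySem.Dict.nodup_keys_empty hbr
    have hB : scanRev req rps.reverse (PySem.Set.ofList req.keys) = true ↔
        ∀ n ∈ req.keys, ∃ v, req.get? n = some v ∧ lastMatch rps n = some (some v) := by
      rw [scanRev_iff req rps.reverse (PySem.Set.ofList req.keys) hnamesR
        (fun n hn => by
          have hmem : n ∈ req.keys := (PySem.Set.mem_ofList _ _).mp hn
          rw [Option.isSome_iff_ne_none]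
          intro hnone
          exact ((PySem.Dict.get?_eq_none_iff_not_mem_keys req n).mp hnone) hmem)]
      constructor
      · intro hall n hn
        obtain ⟨v, hv, hfm⟩ := hall n ((PySem.Set.mem_ofList _ _).mpr hn)
        exact ⟨v, hv, by rw [lastMatch_eq_firstMatch_reverse]; exact hfm⟩
      · intro hall n hn
        obtain ⟨v, hv, hlm⟩ := hall n ((PySem.Set.mem_ofList _ _).mp hn)
        exact ⟨v, hv, by rw [← lastMatch_eq_firstMatch_reverse]; exact hlm⟩
    have hbi := buildRequired_iff rps params PySem.Dict.empty
    rw [hbr] at hbi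
    have hbi' : (∀ n ∈ req.keys, ∃ v, req.get? n = some v ∧ lastMatch rps n = some (some v)) ↔
        (∀ n v, PySem.Dict.empty.get? n = some v → lastMatch rps n = some (some v)) ∧
        (∀ p ∈ params, lastMatch rps p.1 = some (some p.2)) := hbi
    have hAB : checkLoopA (buildRunParams rps) params = true ↔
        scanRev req rps.reverse (PySem.Set.ofList req.keys) = true := by
      rw [hA, hB, hbi']
      constructor
      · intro h; exact ⟨hEmpty, h⟩
      · rintro ⟨_, h⟩; exact h
    show checkLoopA (buildRunParams rps) params =
      scanRev req rps.reverse (PySem.Set.ofList req.keys)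
    cases hca : checkLoopA (buildRunParams rps) params <;>
      cases hcb : scanRev req rps.reverse (PySem.Set.ofList req.keys)
    · rfl
    · exact absurd (hAB.mpr hcb) (by simp [hca])
    · exact absurd (hAB.mp hca) (by simp [hcb])
    · rfl
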